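-- pv_equiv track=rewrite | github.com/cosmologicon/grf | tests/dlx-profile.py | algox2l_args
-- ===== SOURCE A (Python) =====
-- def algox2l_args(subsets):
-- 	subsets = sorted(sorted(subset) for subset in subsets)
-- 	subsets = [set(subset) for subset in subsets]
-- 	nodes = sorted(set(node for subset in subsets for node in subset))
-- 	# containers[jnode] = the set of jsubsets that contain the given node
-- 	containers = [set(jsubset for jsubset, subset in enumerate(subsets) if node in subset) for node in nodes]
-- 	# overlappers[jsubset] = the set of jsubsets that overlap the given subset
-- 	overlappers = [None] * len(subsets)
-- 	jnodes, jsubsets = set(range(len(nodes))), set(range(len(subsets)))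
-- 	return jnodes, jsubsets, subsets, containers, overlappers
-- ===== SOURCE B (Python) =====
-- def algox2l_args(subsets):
-- 	subs = [set(s) for s in sorted(sorted(s) for s in subsets)]
-- 	# single pass over all elements: index[node] = set of subset indices containing node
-- 	index = {}
-- 	j = 0
-- 	for subset in subs:
-- 		for node in subset:
-- 			index.setdefault(node, set()).add(j)
-- 		j += 1
-- 	nodes = sorted(index)
-- 	return (set(range(len(nodes))), set(range(len(subs))), subs,
-- 		[index[n] for n in nodes], [None] * len(subs))
-- ===== Notes on version B (the rewrite author's own statement) =====
-- stated objective: alternative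
-- what changed: Instead of A's nodes-by-subsets double scan that rebuilds a membership test per node, B makes one pass over all subset elements with an explicit index counter, accumulating per-node sets of subset indices in a dict and reading containers straight off the sorted keys.
import Mathlib
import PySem

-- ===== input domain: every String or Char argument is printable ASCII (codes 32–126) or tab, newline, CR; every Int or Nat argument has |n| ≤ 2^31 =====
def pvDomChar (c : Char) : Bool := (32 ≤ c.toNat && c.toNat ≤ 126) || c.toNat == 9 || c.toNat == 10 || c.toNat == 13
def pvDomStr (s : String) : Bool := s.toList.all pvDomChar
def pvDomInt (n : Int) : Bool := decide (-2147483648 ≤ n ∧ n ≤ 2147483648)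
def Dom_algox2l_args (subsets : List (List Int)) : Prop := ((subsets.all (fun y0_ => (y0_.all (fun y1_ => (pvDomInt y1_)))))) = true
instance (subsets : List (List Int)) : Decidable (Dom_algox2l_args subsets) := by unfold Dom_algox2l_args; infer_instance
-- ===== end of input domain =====

-- B replaces A's nodes×subsets double scan for `containers` with one pass over all subset
-- elements keeping an explicit index counter and a node-keyed dict of index sets (objective: alternative).


-- ===== PORT A =====
def algox2l_args (subsets : List (List Int)) : List Int × List Int × List (List Int) × List (List Int) × List (Option Int) :=
  let ss := PySem.List.sorted (subsets.map (fun subset => PySem.List.sorted subset (fun x => x) false)) (fun x => x) false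
  let subs := ss.map (fun subset => PySem.Set.ofList subset)
  let nodes := PySem.List.sorted (PySem.Set.ofList (subs.flatMap (fun subset => subset))) (fun x => x) false
  let containers := nodes.map (fun node =>
    PySem.Set.ofList (((PySem.List.enumerate subs 0).filter (fun p => PySem.Set.contains p.2 node)).map (fun p => p.1)))
  let overlappers : List (Option Int) := List.replicate subs.length none
  let jnodes := PySem.Set.ofList (PySem.List.pyRange 0 (nodes.length : Int) 1)
  let jsubsets := PySem.Set.ofList (PySem.List.pyRange 0 (subs.length : Int) 1)
  (jnodes, jsubsets, subs, containers, overlappers)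

-- ===== PORT B =====
-- index.setdefault(node, set()).add(j)
def pvAddNode (j : Int) (d : PySem.Dict Int (PySem.Set Int)) (node : Int) : PySem.Dict Int (PySem.Set Int) :=
  d.modify node PySem.Set.empty (fun s => PySem.Set.add s j)

-- the `for subset in subs: … j += 1` loop, as explicit recursion carrying the counter j
def pvCollect : List (PySem.Set Int) → Int → PySem.Dict Int (PySem.Set Int) → PySem.Dict Int (PySem.Set Int)
  | [], _, d => d
  | subset :: rest, j, d => pvCollect rest (j + 1) (subset.foldl (pvAddNode j) d)

def algox2l_args_alt (subsets : List (List Int)) : List Int × List Int × List (List Int) × List (List Int) × List (Option Int) :=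
  let subs := (PySem.List.sorted (subsets.map (fun s => PySem.List.sorted s (fun x => x) false)) (fun x => x) false).map PySem.Set.ofList
  let index := pvCollect subs 0 PySem.Dict.empty
  let nodes := PySem.List.sorted index.keys (fun x => x) false
  (PySem.Set.ofList (PySem.List.pyRange 0 (nodes.length : Int) 1),
   PySem.Set.ofList (PySem.List.pyRange 0 (subs.length : Int) 1),
   subs,
   nodes.map (fun n => index.getD n PySem.Set.empty),
   List.replicate subs.length none)

-- ===== PRECONDITION & SPEC =====
def Spec_algox2l_args (subsets : List (List Int)) (out : List Int × List Int × List (List Int) × List (List Int) × List (Option Int)) : Prop := out = algox2l_args_alt subsets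
instance (subsets : List (List Int)) (out : List Int × List Int × List (List Int) × List (List Int) × List (Option Int)) : Decidable (Spec_algox2l_args subsets out) := by unfold Spec_algox2l_args; infer_instance

-- ===== CLAIM (what is proved, stated in full; the proofs are below) =====
def Claim_equal_algox2l_args : Prop := ∀ (subsets : List (List Int)), Dom_algox2l_args subsets → Spec_algox2l_args subsets (algox2l_args subsets)

-- ===== LEMMAS AND PROOFS =====

-- one subset's inner loop, read back through getD
theorem getD_foldl_addNode (s : List Int) (j n : Int) : ∀ (d : PySem.Dict Int (PySem.Set Int)), s.Nodup →
    (s.foldl (pvAddNode j) d).getD n PySem.Set.empty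
      = if n ∈ s then PySem.Set.add (d.getD n PySem.Set.empty) j else d.getD n PySem.Set.empty := by
  induction s with
  | nil => simp
  | cons x t ih =>
    intro d hnd
    rw [List.foldl_cons, ih _ (List.Nodup.of_cons hnd)]
    by_cases hx : n = x
    · subst hx
      have hnt : n ∉ t := (List.nodup_cons.mp hnd).1
      simp [hnt, pvAddNode, PySem.Dict.getD_modify_self]
    · rw [pvAddNode, PySem.Dict.getD_modify_of_ne _ _ _ hx]
      simp [hx]

-- the whole counting pass, read back through getD
theorem getD_pvCollect (l : List (PySem.Set Int)) (n : Int) : ∀ (j : Int) (d : PySem.Dict Int (PySem.Set Int)),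
    (∀ s ∈ l, s.Nodup) → (∀ m ∈ d.getD n PySem.Set.empty, m < j) →
    (pvCollect l j d).getD n PySem.Set.empty
      = d.getD n PySem.Set.empty ++ ((PySem.List.enumerate l j).filter (fun p => PySem.Set.contains p.2 n)).map (fun p => p.1) := by
  induction l with
  | nil => simp [pvCollect]
  | cons s t ih =>
    intro j d hnd hlt
    have hinner := getD_foldl_addNode s j n d (hnd s List.mem_cons_self)
    by_cases hs : n ∈ s
    · have hfresh : j ∉ d.getD n PySem.Set.empty := fun hm => lt_irrefl j (hlt j hm)
      have heq : (s.foldl (pvAddNode j) d).getD n PySem.Set.empty = d.getD n PySem.Set.empty ++ [j] := by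
        rw [hinner, if_pos hs]
        simp only [PySem.Set.add, PySem.Set.contains]
        rw [if_neg (by simpa using hfresh)]
      rw [pvCollect, ih (j + 1) _ (fun s hs => hnd s (List.mem_cons_of_mem _ hs))
           (by rw [heq]; intro m hm
               rcases List.mem_append.mp hm with hm | hm
               · exact lt_trans (hlt m hm) (by omega)
               · simp at hm; omega),
          heq]
      simp [hs, PySem.List.enumerate_cons, PySem.Set.contains]
    · have heq : (s.foldl (pvAddNode j) d).getD n PySem.Set.empty = d.getD n PySem.Set.empty := by
        rw [hinner, if_neg hs]
      rw [pvCollect, ih (j + 1) _ (fun s hs => hnd s (List.mem_cons_of_mem _ hs))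
           (by rw [heq]; intro m hm; exact lt_trans (hlt m hm) (by omega)),
          heq]
      simp [hs, PySem.List.enumerate_cons, PySem.Set.contains]

-- keys of the counting pass
theorem keys_pvCollect (l : List (PySem.Set Int)) : ∀ (j : Int) (d : PySem.Dict Int (PySem.Set Int)),
    (pvCollect l j d).keys = PySem.Set.update d.keys (l.flatMap (fun s => s)) := by
  induction l with
  | nil => intro j d; rfl
  | cons s t ih =>
    intro j d
    rw [pvCollect, ih]
    have : (s.foldl (pvAddNode j) d).keys = PySem.Set.update d.keys s := by
      rw [show pvAddNode j = (fun (d : PySem.Dict Int (PySem.Set Int)) node =>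
            d.modify node PySem.Set.empty (fun s => PySem.Set.add s j)) from rfl]
      exact PySem.Dict.keys_foldl_modify s PySem.Set.empty (fun _ _ s => PySem.Set.add s j) d
    rw [this, List.flatMap_cons, PySem.Set.update_append]

-- fsts of a filtered enumeration are distinct
theorem nodup_filter_enumerate_fst (l : List (PySem.Set Int)) (j : Int) (q : Int × PySem.Set Int → Bool) :
    (((PySem.List.enumerate l j).filter q).map (fun p => p.1)).Nodup := by
  refine List.Nodup.sublist (List.Sublist.map _ List.filter_sublist) ?_
  rw [show (fun p : Int × PySem.Set Int => p.1) = (Prod.fst) from rfl, PySem.List.map_fst_enumerate]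
  exact PySem.List.nodup_pyRange_one _ _

-- ===== VERDICT (by name: the statement is the Claim_ definition above) =====
theorem algox2l_args_spec : Claim_equal_algox2l_args := by
  intro subsets _
  unfold Spec_algox2l_args
  simp only [algox2l_args, algox2l_args_alt]
  set subs := (PySem.List.sorted (subsets.map (fun subset => PySem.List.sorted subset (fun x => x) false)) (fun x => x) false).map (fun subset => PySem.Set.ofList subset) with hsubs
  have hnd : ∀ s ∈ subs, s.Nodup := by
    intro s hs
    rw [hsubs] at hs
    obtain ⟨a, _, ha⟩ := List.mem_map.mp hs
    rw [← ha]; exact PySem.Set.nodup_ofList a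
  have hkeys : (pvCollect subs 0 PySem.Dict.empty).keys = PySem.Set.ofList (subs.flatMap (fun s => s)) := by
    rw [keys_pvCollect]
    simp [PySem.Dict.keys_empty, PySem.Set.update_nil_left]
  rw [hkeys]
  have hcont : ∀ n : Int,
      PySem.Set.ofList (((PySem.List.enumerate subs 0).filter (fun p => PySem.Set.contains p.2 n)).map (fun p => p.1))
        = (pvCollect subs 0 PySem.Dict.empty).getD n PySem.Set.empty := by
    intro n
    rw [getD_pvCollect subs n 0 PySem.Dict.empty hnd (by simp [PySem.Dict.getD_empty, PySem.Set.empty])]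
    simp [PySem.Dict.getD_empty, PySem.Set.empty]
    exact PySem.Set.ofList_eq_self_of_nodup _ (nodup_filter_enumerate_fst subs 0 _)
  simp only [hcont]
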